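-- pv_equiv track=rewrite | github.com/r3adm3/deltamathematica | deltamathematica.py | interpart2
-- ===== SOURCE A (Python) =====
-- def interpart2(checkee):
--     backside=-1
--     refurb=[]
--     for x in range(0, len(checkee)):
--         stack = ""
--         if x > backside:
--             if "(" in checkee[x]:
--                 if ")" not in checkee[x]:
--                     for y in range(x+1, len(checkee)):
--                         if ")" in checkee[y]:
--                             for z in range(x,y+1):
--                                 stack = stack + checkee[z]
--                             refurb.append(stack)
--                             backside = y
--                             break
--             else:
--                 refurb.append(checkee[x])
--     return refurb
-- ===== SOURCE B (Python) =====
-- def interpart2(checkee):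
--     # Online state machine (single forward fold), no index arithmetic and no
--     # lookahead scans: outside a group, plain tokens are emitted and '('-tokens
--     # open a buffer; inside a group every token goes into the buffer until a
--     # ')'-token flushes it as one joined string.  An unterminated buffer is
--     # flushed token-wise at the end (its tail can contain no ')'-token, so a
--     # token there is kept exactly when it has no '(').
--     out = []
--     buf = None
--     for t in checkee:
--         if buf is not None:
--             buf.append(t)
--             if ")" in t:
--                 out.append("".join(buf))
--                 buf = None
--         elif "(" in t:
--             if ")" not in t:
--                 buf = [t]
--         else:
--             out.append(t)
--     if buf is not None:
--         for t in buf[1:]: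
--             if "(" not in t:
--                 out.append(t)
--     return out
-- ===== Notes on version B (the rewrite author's own statement) =====
-- stated objective: alternative
-- what changed: Replaces A's index loop with a 'backside' skip marker, a nested forward scan for the closing token and repeated string '+' by a single online state-machine fold (outside/inside-group modes with a buffer, no indices and no lookahead), flushing each group with one join and flushing an unterminated buffer token-wise at the end.
import Mathlib
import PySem

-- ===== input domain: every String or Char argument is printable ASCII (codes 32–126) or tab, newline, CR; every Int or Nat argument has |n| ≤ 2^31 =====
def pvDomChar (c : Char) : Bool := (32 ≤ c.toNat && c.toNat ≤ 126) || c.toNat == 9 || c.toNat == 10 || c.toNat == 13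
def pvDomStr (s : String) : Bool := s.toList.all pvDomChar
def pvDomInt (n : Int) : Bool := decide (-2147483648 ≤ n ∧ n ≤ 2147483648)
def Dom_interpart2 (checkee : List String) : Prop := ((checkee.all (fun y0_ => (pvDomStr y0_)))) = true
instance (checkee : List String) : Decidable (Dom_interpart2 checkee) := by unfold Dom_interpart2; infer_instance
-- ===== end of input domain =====

-- B replaces A's index loop with skip marker, nested forward close-scan and repeated '+'
-- by a single online state-machine fold (buffer mode, one join per group); same values.

-- ===== PORT A =====
-- inner 'for z in range(x, y+1): stack = stack + checkee[z]'
def aStack (checkee : List String) (y z : Nat) (stack : String) : String :=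
  if z ≤ y then aStack checkee y (z + 1) (stack ++ checkee.getD z "") else stack
termination_by y + 1 - z

-- inner 'for y in range(x+1, len(checkee)): if ")" in checkee[y]: …; break'
-- returns the (backside, refurb) state after the loop
def aScan (checkee : List String) (x y : Nat) (backside : Int) (refurb : List String) :
    Int × List String :=
  if y < checkee.length then
    if PySem.Str.isIn ")" (checkee.getD y "") then
      ((y : Int), refurb ++ [aStack checkee y x ""])
    else aScan checkee x (y + 1) backside refurb
  else (backside, refurb)
termination_by checkee.length - y

-- outer 'for x in range(0, len(checkee))' with state (backside, refurb)
def aLoop (checkee : List String) (x : Nat) (backside : Int) (refurb : List String) :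
    List String :=
  if x < checkee.length then
    if (x : Int) > backside then
      if PySem.Str.isIn "(" (checkee.getD x "") then
        if ¬ PySem.Str.isIn ")" (checkee.getD x "") then
          let st := aScan checkee x (x + 1) backside refurb
          aLoop checkee (x + 1) st.1 st.2
        else aLoop checkee (x + 1) backside refurb
      else aLoop checkee (x + 1) backside (refurb ++ [checkee.getD x ""])
    else aLoop checkee (x + 1) backside refurb
  else refurb
termination_by checkee.length - x

def interpart2 (checkee : List String) : List String := aLoop checkee 0 (-1) []

-- ===== PORT B =====
-- one iteration of B's for-loop: state = (out, buf) with buf = none outside a group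
def bStep (st : List String × Option (List String)) (t : String) :
    List String × Option (List String) :=
  match st with
  | (out, some buf) =>
      let buf' := buf ++ [t]
      if PySem.Str.isIn ")" t then (out ++ [PySem.Str.join "" buf'], none)
      else (out, some buf')
  | (out, none) =>
      if PySem.Str.isIn "(" t then
        if ¬ PySem.Str.isIn ")" t then (out, some [t]) else (out, none)
      else (out ++ [t], none)

-- B's final flush of an unterminated buffer: 'for t in buf[1:]: if "(" not in t: out.append(t)'
def bFlush (st : List String × Option (List String)) : List String :=
  match st.2 with
  | none => st.1
  | some buf => st.1 ++ (buf.drop 1).filter (fun t => ¬ PySem.Str.isIn "(" t)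

def interpart2_alt (checkee : List String) : List String :=
  bFlush (checkee.foldl bStep ([], none))

-- ===== PRECONDITION & SPEC =====
def Spec_interpart2 (checkee : List String) (out : List String) : Prop := out = interpart2_alt checkee
instance (checkee : List String) (out : List String) : Decidable (Spec_interpart2 checkee out) := by unfold Spec_interpart2; infer_instance

-- ===== CLAIM (what is proved, stated in full; the proofs are below) =====
def Claim_equal_interpart2 : Prop := ∀ (checkee : List String), Dom_interpart2 checkee → Spec_interpart2 checkee (interpart2 checkee)

-- ===== LEMMAS AND PROOFS =====

-- proof-only helper: index of the first token at or after j containing ")"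
def nextClose (checkee : List String) (j : Nat) : Option Nat :=
  if j < checkee.length then
    if PySem.Str.isIn ")" (checkee.getD j "") then some j else nextClose checkee (j + 1)
  else none
termination_by checkee.length - j

theorem nextClose_ge (checkee : List String) (j k : Nat)
    (h : nextClose checkee j = some k) : j ≤ k ∧ k < checkee.length := by
  fun_induction nextClose checkee j with
  | case1 => simp_all
  | case2 j hj hc ih => have := ih h; omega
  | case3 => simp_all

-- proof-only reference form of A: a jumping cursor over indices
def refLoop (checkee : List String) (i : Nat) : List String :=
  if i < checkee.length then
    let t := checkee.getD i ""
    if ¬ PySem.Str.isIn "(" t then t :: refLoop checkee (i + 1)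
    else if PySem.Str.isIn ")" t then refLoop checkee (i + 1)
    else
      match h : nextClose checkee (i + 1) with
      | some j =>
          PySem.Str.join "" (PySem.List.slice checkee (some (i : Int)) (some ((j : Int) + 1)))
            :: refLoop checkee (j + 1)
      | none => refLoop checkee (i + 1)
  else []
termination_by checkee.length - i
decreasing_by
  · omega
  · omega
  · have := nextClose_ge checkee (i + 1) j h; omega
  · omega

theorem join_empty_nil : PySem.Str.join "" ([] : List String) = "" := rfl

theorem join_empty_cons (a : String) (l : List String) :
    PySem.Str.join "" (a :: l) = a ++ PySem.Str.join "" l := by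
  cases l with
  | nil => simp [PySem.Str.join, PySem.Chars.join, List.intercalate]
  | cons b bs => simp [PySem.Str.join, PySem.Chars.join, List.intercalate]

-- A's repeated '+' concatenation equals one join over the segment checkee[z..y]
theorem aStack_eq (checkee : List String) (y : Nat) (hy : y < checkee.length) :
    ∀ z, z ≤ y + 1 → ∀ s, aStack checkee y z s =
      s ++ PySem.Str.join "" ((checkee.drop z).take (y + 1 - z)) := by
  intro z
  induction hz : (y + 1 - z) generalizing z with
  | zero =>
    intro hzy s
    have hz1 : z = y + 1 := by omega
    rw [aStack]
    simp [hz1, join_empty_nil]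
  | succ n ih =>
    intro hzy s
    have hzy' : z ≤ y := by omega
    have hzlen : z < checkee.length := by omega
    rw [aStack]
    simp only [hzy', if_pos]
    rw [ih (z + 1) (by omega) (by omega)]
    have hdrop : checkee.drop z = checkee[z] :: checkee.drop (z + 1) :=
      List.drop_eq_getElem_cons hzlen
    rw [hdrop]
    simp only [List.take_succ_cons]
    rw [join_empty_cons]
    have hg : checkee.getD z "" = checkee[z] := by
      simp [List.getD, List.getElem?_eq_getElem hzlen]
    rw [hg, String.append_assoc]

-- A's inner y-scan returns what nextClose finds
theorem aScan_eq (checkee : List String) (x : Nat) :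
    ∀ y b r, aScan checkee x y b r =
      match nextClose checkee y with
      | none => (b, r)
      | some j => ((j : Int), r ++ [aStack checkee j x ""]) := by
  intro y
  induction hy : (checkee.length - y) generalizing y with
  | zero =>
    intro b r
    rw [aScan, nextClose]
    simp [show ¬ y < checkee.length by omega]
  | succ n ih =>
    intro b r
    rw [aScan, nextClose]
    by_cases hlt : y < checkee.length
    · rw [if_pos hlt, if_pos hlt]
      by_cases hc : PySem.Str.isIn ")" (checkee.getD y "") = true
      · rw [if_pos hc, if_pos hc]
      · rw [if_neg hc, if_neg hc]
        exact ih (y + 1) (by omega) b r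
    · rw [if_neg hlt, if_neg hlt]

-- once backside = j, the iterations x..j are skipped: the loop restarts at j+1
theorem aLoop_skip (checkee : List String) (j : Nat) :
    ∀ x, x ≤ j + 1 → ∀ r, aLoop checkee x (j : Int) r = aLoop checkee (j + 1) (j : Int) r := by
  intro x
  induction hx : (j + 1 - x) generalizing x with
  | zero =>
    intro hxj r
    have : x = j + 1 := by omega
    rw [this]
  | succ n ih =>
    intro hxj r
    have hxj' : x ≤ j := by omega
    by_cases hlt : x < checkee.length
    · rw [aLoop]
      simp only [hlt, if_pos]
      have : ¬ ((x : Int) > (j : Int)) := by exact_mod_cast not_lt.mpr (by exact_mod_cast hxj')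
      rw [if_neg this]
      exact ih (x + 1) (by omega) (by omega) r
    · rw [aLoop]
      rw [if_neg hlt]
      rw [aLoop]
      have : ¬ (j + 1 < checkee.length) := by omega
      simp [this]

-- A's loop with backside strictly below the cursor appends exactly the cursor form
theorem aLoop_eq_refLoop (checkee : List String) :
    ∀ k x, checkee.length - x ≤ k → ∀ (b : Int) r, b < (x : Int) →
      aLoop checkee x b r = r ++ refLoop checkee x := by
  intro k
  induction k with
  | zero =>
    intro x hx b r hb
    have hlt : ¬ x < checkee.length := by omega
    rw [aLoop, refLoop, if_neg hlt, if_neg hlt]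
    simp
  | succ k ih =>
    intro x hx b r hb
    by_cases hlt : x < checkee.length
    · rw [aLoop, refLoop, if_pos hlt, if_pos hlt]
      have hguard : (x : Int) > b := hb
      rw [if_pos hguard]
      by_cases hop : PySem.Str.isIn "(" (checkee.getD x "") = true
      · by_cases hcl : PySem.Str.isIn ")" (checkee.getD x "") = true
        · rw [if_pos hop, if_neg (not_not_intro hcl), if_neg (not_not_intro hop), if_pos hcl]
          exact ih (x + 1) (by omega) b r (by push_cast; omega)
        · rw [if_pos hop, if_pos hcl, if_neg (not_not_intro hop), if_neg hcl]
          rw [aScan_eq]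
          cases hnc : nextClose checkee (x + 1) with
          | none =>
            simp only []
            exact ih (x + 1) (by omega) b r (by push_cast; omega)
          | some j =>
            simp only []
            obtain ⟨hj1, hj2⟩ := nextClose_ge checkee (x + 1) j hnc
            rw [aLoop_skip checkee j (x + 1) (by omega)]
            rw [ih (j + 1) (by omega) (j : Int) (r ++ [aStack checkee j x ""])
              (by push_cast; omega)]
            have hst : aStack checkee j x "" =
                PySem.Str.join "" (PySem.List.slice checkee (some (x : Int)) (some ((j : Int) + 1))) := by
              have hc1 : ((j : Int) + 1) = ((j + 1 : Nat) : Int) := by push_cast; ring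
              rw [hc1, PySem.List.slice_natCast]
              rw [aStack_eq checkee j hj2 x (by omega) ""]
              simp
            rw [hst]
            simp
      · rw [if_neg hop, if_pos hop]
        rw [ih (x + 1) (by omega) b (r ++ [checkee.getD x ""]) (by push_cast; omega)]
        simp
    · rw [aLoop, refLoop, if_neg hlt, if_neg hlt]
      simp

-- ===== cursor form = B's state machine =====

-- drop i with i in range is getD i cons drop (i+1)
theorem drop_cons (checkee : List String) (i : Nat) (h : i < checkee.length) :
    checkee.drop i = checkee.getD i "" :: checkee.drop (i + 1) := by
  rw [List.drop_eq_getElem_cons h]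
  simp [List.getD, List.getElem?_eq_getElem h]

-- inside-group mode: the fold buffers everything up to the next close
theorem foldl_some (checkee : List String) :
    ∀ j out acc, (checkee.drop j).foldl bStep (out, some acc) =
      match nextClose checkee j with
      | some k =>
          (checkee.drop (k + 1)).foldl bStep
            (out ++ [PySem.Str.join "" (acc ++ (checkee.drop j).take (k + 1 - j))], none)
      | none => (out, some (acc ++ checkee.drop j)) := by
  intro j
  induction hj : (checkee.length - j) generalizing j with
  | zero =>
    intro out acc
    have hlt : ¬ j < checkee.length := by omega
    rw [nextClose, if_neg hlt]
    simp [List.drop_eq_nil_of_le (by omega : checkee.length ≤ j)]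
  | succ n ih =>
    intro out acc
    by_cases hlt : j < checkee.length
    · rw [drop_cons checkee j hlt, List.foldl_cons, nextClose, if_pos hlt]
      by_cases hc : PySem.Str.isIn ")" (checkee.getD j "") = true
      · rw [if_pos hc]
        simp only [bStep, hc, if_pos]
        have h1 : j + 1 - j = 1 := by omega
        rw [h1]
        simp
      · rw [if_neg hc]
        simp only [bStep, hc, Bool.false_eq_true, if_false]
        rw [ih (j + 1) (by omega) out (acc ++ [checkee.getD j ""])]
        cases hnc : nextClose checkee (j + 1) with
        | none =>
          simp only []
          simp
        | some k =>
          simp only []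
          obtain ⟨hk1, hk2⟩ := nextClose_ge checkee (j + 1) k hnc
          have ht1 : k + 1 - j = (k - j) + 1 := by omega
          have ht2 : k + 1 - (j + 1) = k - j := by omega
          rw [ht1, ht2, List.take_succ_cons]
          simp
    · omega

-- refLoop over a close-free suffix keeps exactly the '('-free tokens
theorem refLoop_noClose (checkee : List String) :
    ∀ j, nextClose checkee j = none →
      refLoop checkee j = (checkee.drop j).filter (fun t => ¬ PySem.Str.isIn "(" t) := by
  intro j
  induction hj : (checkee.length - j) generalizing j with
  | zero =>
    intro _
    have hlt : ¬ j < checkee.length := by omega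
    rw [refLoop, if_neg hlt]
    simp [List.drop_eq_nil_of_le (by omega : checkee.length ≤ j)]
  | succ n ih =>
    intro hnc
    by_cases hlt : j < checkee.length
    · rw [nextClose, if_pos hlt] at hnc
      by_cases hc : PySem.Str.isIn ")" (checkee.getD j "") = true
      · rw [if_pos hc] at hnc; exact absurd hnc (by simp)
      · rw [if_neg hc] at hnc
        rw [refLoop, if_pos hlt]
        rw [drop_cons checkee j hlt]
        by_cases hop : PySem.Str.isIn "(" (checkee.getD j "") = true
        · simp only [hop, not_true_eq_false, if_false, hc, Bool.false_eq_true, if_false]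
          rw [hnc]
          simp only []
          rw [ih (j + 1) (by omega) hnc]
          have hop' : PySem.Str.isIn "(" (checkee.getD j "") = true := hop
          simp [List.filter_cons, PySem.Str.isIn] at hop' ⊢
          simp [hop']
        · simp only [hop, Bool.false_eq_true, not_false_eq_true, if_true]
          rw [ih (j + 1) (by omega) hnc]
          have hop' : ¬ PySem.Str.isIn "(" (checkee.getD j "") = true := hop
          simp [List.filter_cons, PySem.Str.isIn] at hop' ⊢
          simp [hop']
    · omega

-- outside mode: the fold followed by the final flush produces the cursor form's output
theorem foldl_none (checkee : List String) :
    ∀ k i, checkee.length - i ≤ k → ∀ out,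
      bFlush ((checkee.drop i).foldl bStep (out, none)) = out ++ refLoop checkee i := by
  intro k
  induction k with
  | zero =>
    intro i hi out
    have hlt : ¬ i < checkee.length := by omega
    rw [refLoop, if_neg hlt]
    simp [List.drop_eq_nil_of_le (by omega : checkee.length ≤ i), bFlush]
  | succ k ih =>
    intro i hi out
    by_cases hlt : i < checkee.length
    · rw [drop_cons checkee i hlt, List.foldl_cons, refLoop, if_pos hlt]
      by_cases hop : PySem.Str.isIn "(" (checkee.getD i "") = true
      · by_cases hc : PySem.Str.isIn ")" (checkee.getD i "") = true
        · simp only [bStep, hop, if_pos, hc, not_true_eq_false, if_false]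
          rw [ih (i + 1) (by omega) out]
        · simp only [bStep, hop, if_pos, hc, Bool.false_eq_true, not_false_eq_true,
            if_false]
          rw [foldl_some checkee (i + 1) out [checkee.getD i ""]]
          cases hnc : nextClose checkee (i + 1) with
          | none =>
            simp only [bFlush]
            rw [refLoop_noClose checkee (i + 1) hnc]
            simp
          | some j =>
            obtain ⟨hj1, hj2⟩ := nextClose_ge checkee (i + 1) j hnc
            rw [ih (j + 1) (by omega)]
            have hsl : PySem.List.slice checkee (some (i : Int)) (some ((j : Int) + 1)) =
                [checkee.getD i ""] ++ (checkee.drop (i + 1)).take (j + 1 - (i + 1)) := by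
              have hc1 : ((j : Int) + 1) = ((j + 1 : Nat) : Int) := by push_cast; ring
              rw [hc1, PySem.List.slice_natCast]
              rw [drop_cons checkee i hlt]
              have : j + 1 - i = (j + 1 - (i + 1)) + 1 := by omega
              rw [this, List.take_succ_cons]
              simp
            simp [hsl]
      · simp only [bStep, hop, Bool.false_eq_true, if_false]
        rw [ih (i + 1) (by omega) (out ++ [checkee.getD i ""])]
        simp
    · rw [refLoop, if_neg hlt]
      simp [List.drop_eq_nil_of_le (by omega : checkee.length ≤ i), bFlush]

-- ===== VERDICT (by name: the statement is the Claim_ definition above) =====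
theorem interpart2_spec : Claim_equal_interpart2 := by
  intro checkee _
  unfold Spec_interpart2 interpart2 interpart2_alt
  rw [aLoop_eq_refLoop checkee checkee.length 0 (by omega) (-1) [] (by norm_num)]
  calc refLoop checkee 0 = [] ++ refLoop checkee 0 := by simp
    _ = bFlush ((checkee.drop 0).foldl bStep ([], none)) :=
          (foldl_none checkee checkee.length 0 (by omega) []).symm
    _ = bFlush (checkee.foldl bStep ([], none)) := by rw [List.drop_zero]
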